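-- pv_equiv track=rewrite | github.com/epilectrik/voynich | phases/SPEC_A_semantic_mapping/error_state_hypothesis.py | has_repetition
-- ===== SOURCE A (Python) =====
-- def has_repetition(tokens):
--     n = len(tokens)
--     if n < 4:
--         return False
--     for block_size in range(1, n // 2 + 1):
--         if n % block_size == 0:
--             count = n // block_size
--             if count >= 2:
--                 block = tokens[:block_size]
--                 if all(tokens[i*block_size:(i+1)*block_size] == block for i in range(1, count)):
--                     return True
--     return False
-- ===== SOURCE B (Python) =====
-- def has_repetition(tokens):
--     n = len(tokens)
--     if n < 4:
--         return False
--     # collect the distinct prime factors of n by trial division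
--     m, q, primes = n, 2, []
--     while q * q <= m:
--         if m % q == 0:
--             primes.append(q)
--             while m % q == 0:
--                 m //= q
--         q += 1
--     if m > 1:
--         primes.append(m)
--     # repetition iff tokens is (n//q)-periodic for some prime factor q of n
--     for q in primes:
--         d = n // q
--         if all(tokens[i] == tokens[i + d] for i in range(n - d)):
--             return True
--     return False
-- ===== Notes on version B (the rewrite author's own statement) =====
-- stated objective: faster
-- what changed: A scans every candidate block size 1..n//2 and compares block slices; B factorises n by trial division and runs one early-exit self-overlap periodicity check per distinct prime factor of n, using that a sequence is a repeated block iff it is (n/q)-periodic for some prime factor q.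
import Mathlib
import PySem

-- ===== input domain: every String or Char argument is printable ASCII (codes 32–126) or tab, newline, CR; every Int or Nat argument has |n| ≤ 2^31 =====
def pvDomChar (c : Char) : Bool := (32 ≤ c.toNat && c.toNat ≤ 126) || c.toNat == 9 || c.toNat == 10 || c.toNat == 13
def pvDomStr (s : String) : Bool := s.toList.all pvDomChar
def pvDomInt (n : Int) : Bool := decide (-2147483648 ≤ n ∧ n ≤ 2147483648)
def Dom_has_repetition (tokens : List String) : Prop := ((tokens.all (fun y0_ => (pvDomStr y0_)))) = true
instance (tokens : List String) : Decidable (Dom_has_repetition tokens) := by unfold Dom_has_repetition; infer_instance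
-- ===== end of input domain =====

-- B replaces A's scan of all n/2 candidate block sizes by trial-division prime factorisation of n
-- plus one self-overlap periodicity check per distinct prime factor (objective: faster).

-- ===== PORT A =====
-- Python slices tokens[:bs] and tokens[i*bs:(i+1)*bs] have 0 ≤ start ≤ stop, so take/drop is exact.
-- range(1, n//2+1) = List.range' 1 (n/2); range(1, count) = List.range' 1 (count-1).
def has_repetition (tokens : List String) : Bool :=
  let n := tokens.length
  if n < 4 then false else
  (List.range' 1 (n / 2)).any (fun bs =>
    if n % bs == 0 then
      let count := n / bs
      if 2 ≤ count then
        let block := tokens.take bs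
        (List.range' 1 (count - 1)).all (fun i =>
          (tokens.drop (i * bs)).take bs == block)
      else false
    else false)

-- ===== PORT B =====
-- inner loop 'while m % q == 0: m //= q'; the guards 2 ≤ q, 1 ≤ m only make it total
-- (they hold on every call the outer loop makes).
def divOut (m q : Nat) : Nat :=
  if h : 2 ≤ q ∧ 1 ≤ m ∧ m % q = 0 then divOut (m / q) q else m
termination_by m
decreasing_by exact Nat.div_lt_self h.2.1 (by omega)

theorem divOut_le (m q : Nat) : divOut m q ≤ m := by
  fun_induction divOut m q with
  | case1 m hcond ih => exact le_trans ih (Nat.div_le_self _ _)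
  | case2 m hcond => exact le_rfl

-- outer loop 'while q*q <= m: …'; its base case carries Python's final 'if m > 1: primes.append(m)'.
def trialDiv (m q : Nat) : List Nat :=
  if q * q ≤ m then
    if m % q = 0 then q :: trialDiv (divOut m q) (q + 1)
    else trialDiv m (q + 1)
  else if 1 < m then [m] else []
termination_by m + 1 - q
decreasing_by
  · have h1 := divOut_le m q
    have h2 : q ≤ m := by nlinarith
    omega
  · have h2 : q ≤ m := by nlinarith
    omega

-- Python indexes tokens[i], tokens[i+d] with 0 ≤ i < n-d and d = n//q ≤ n, both in range; getD is exact.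
def has_repetition_alt (tokens : List String) : Bool :=
  let n := tokens.length
  if n < 4 then false else
  (trialDiv n 2).any (fun q =>
    let d := n / q
    (List.range (n - d)).all (fun i => tokens.getD i "" == tokens.getD (i + d) ""))

-- ===== PRECONDITION & SPEC =====
def Spec_has_repetition (tokens : List String) (out : Bool) : Prop := out = has_repetition_alt tokens
instance (tokens : List String) (out : Bool) : Decidable (Spec_has_repetition tokens out) := by unfold Spec_has_repetition; infer_instance

-- ===== CLAIM (what is proved, stated in full; the proofs are below) =====
def Claim_equal_has_repetition : Prop := ∀ (tokens : List String), Dom_has_repetition tokens → Spec_has_repetition tokens (has_repetition tokens)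

-- ===== LEMMAS AND PROOFS =====

/-- `tokens` is `d`-periodic (as far as it goes). -/
def Per (tokens : List String) (d : Nat) : Prop :=
  ∀ i, i + d < tokens.length → tokens.getD i "" = tokens.getD (i + d) ""

theorem perB_iff (tokens : List String) (d : Nat) :
    ((List.range (tokens.length - d)).all
      (fun i => tokens.getD i "" == tokens.getD (i + d) "") = true) ↔ Per tokens d := by
  simp only [List.all_eq_true, List.mem_range, beq_iff_eq, Per]
  constructor
  · intro h i hi; exact h i (by omega)
  · intro h i hi; exact h i (by omega)

theorem per_iter (tokens : List String) (b : Nat) (hp : Per tokens b) :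
    ∀ t i, i + t * b < tokens.length → tokens.getD i "" = tokens.getD (i + t * b) "" := by
  intro t
  induction t with
  | zero => intro i _; simp
  | succ t ih =>
    intro i hi
    have hniceb : (t + 1) * b = t * b + b := by ring
    have h1 : i + b + t * b < tokens.length := by omega
    have h2 : i + b < tokens.length := by omega
    have e3 : i + b + t * b = i + (t + 1) * b := by omega
    calc tokens.getD i "" = tokens.getD (i + b) "" := hp i h2
      _ = tokens.getD (i + b + t * b) "" := ih (i + b) h1
      _ = tokens.getD (i + (t + 1) * b) "" := by rw [e3]

theorem per_dvd (tokens : List String) (b d : Nat) (hp : Per tokens b) (hd : b ∣ d) :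
    Per tokens d := by
  obtain ⟨t, rfl⟩ := hd
  intro i hi
  have := per_iter tokens b hp t i (by rw [Nat.mul_comm]; exact hi)
  rwa [Nat.mul_comm t b] at this

theorem slice_eq_iff (tokens : List String) (b i : Nat) (h : (i + 1) * b ≤ tokens.length) :
    (((tokens.drop (i * b)).take b == tokens.take b) = true) ↔
      ∀ r < b, tokens.getD (i * b + r) "" = tokens.getD r "" := by
  rw [beq_iff_eq]
  have hib : i * b + b ≤ tokens.length := by
    have : (i + 1) * b = i * b + b := by ring
    omega
  have l1 : ((tokens.drop (i * b)).take b).length = b := by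
    simp only [List.length_take, List.length_drop]; omega
  have l2 : (tokens.take b).length = b := by
    simp only [List.length_take]; omega
  constructor
  · intro he r hr
    have h1 : r < ((tokens.drop (i * b)).take b).length := by omega
    have := List.getElem_of_eq he h1
    simp only [List.getElem_take, List.getElem_drop] at this
    rw [List.getD_eq_getElem tokens "" (by omega : i * b + r < tokens.length),
        List.getD_eq_getElem tokens "" (by omega : r < tokens.length)]
    exact this
  · intro hr
    apply List.ext_getElem (by omega)
    intro r h1 h2
    simp only [List.getElem_take, List.getElem_drop]
    have hrb : r < b := by omega
    have := hr r hrb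
    rwa [List.getD_eq_getElem tokens "" (by omega : i * b + r < tokens.length),
        List.getD_eq_getElem tokens "" (by omega : r < tokens.length)] at this

theorem block_iff (tokens : List String) (b : Nat) (hb : 1 ≤ b)
    (hdvd : b ∣ tokens.length) (hc : 2 ≤ tokens.length / b) :
    ((List.range' 1 (tokens.length / b - 1)).all
      (fun i => (tokens.drop (i * b)).take b == tokens.take b) = true) ↔ Per tokens b := by
  set n := tokens.length with hn
  have hcb : (n / b) * b = n := Nat.div_mul_cancel hdvd
  rw [List.all_eq_true]
  constructor
  · intro hall
    have C : ∀ t r, r < b → t * b + r < n → tokens.getD (t * b + r) "" = tokens.getD r "" := by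
      intro t r hr hlt
      rcases Nat.eq_zero_or_pos t with rfl | ht
      · simp
      · have htc : t < n / b := by
          by_contra hge
          have hge' : n / b ≤ t := Nat.le_of_not_lt hge
          have : (n / b) * b ≤ t * b := Nat.mul_le_mul_right b hge'
          omega
        have hmem : t ∈ List.range' 1 (n / b - 1) := by
          rw [List.mem_range'_1]; omega
        have h1 : (t + 1) * b ≤ n := by
          calc (t + 1) * b ≤ (n / b) * b := Nat.mul_le_mul_right b htc
            _ = n := hcb
        exact (slice_eq_iff tokens b t h1).mp (hall t hmem) r hr
    intro i hi
    have hrb : i % b < b := Nat.mod_lt _ (by omega)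
    have hieq : i = (i / b) * b + i % b := by
      rw [Nat.mul_comm]; exact (Nat.div_add_mod i b).symm
    have e1 : tokens.getD i "" = tokens.getD (i % b) "" := by
      conv_lhs => rw [hieq]
      exact C (i / b) (i % b) hrb (by omega)
    have e2 : tokens.getD (i + b) "" = tokens.getD (i % b) "" := by
      have heq : i + b = (i / b + 1) * b + i % b := by
        rw [Nat.add_mul, Nat.one_mul]; omega
      conv_lhs => rw [heq]
      exact C (i / b + 1) (i % b) hrb (by omega)
    rw [e1, e2]
  · intro hp i hmem
    rw [List.mem_range'_1] at hmem
    have hic : i + 1 ≤ n / b := by omega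
    have h1 : (i + 1) * b ≤ n := by
      calc (i + 1) * b ≤ (n / b) * b := Nat.mul_le_mul_right b hic
        _ = n := hcb
    rw [slice_eq_iff tokens b i h1]
    intro r hr
    have hx : (i + 1) * b = i * b + b := by ring
    have := per_iter tokens b hp i r (by omega)
    rw [Nat.add_comm r (i * b)] at this
    exact this.symm

-- characterisation of port A
theorem A_iff (tokens : List String) :
    has_repetition tokens = true ↔
      4 ≤ tokens.length ∧ ∃ b, 1 ≤ b ∧ b ≤ tokens.length / 2 ∧ b ∣ tokens.length ∧ Per tokens b := by
  set n := tokens.length with hn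
  unfold has_repetition
  by_cases h4 : n < 4
  · simp only [← hn]
    rw [if_pos h4]
    simp
    omega
  · simp only [← hn]
    rw [if_neg h4]
    rw [List.any_eq_true]
    constructor
    · rintro ⟨bs, hmem, hx⟩
      rw [List.mem_range'_1] at hmem
      by_cases hdvd : n % bs = 0
      · have hbsdvd : bs ∣ n := Nat.dvd_of_mod_eq_zero hdvd
        have hc : 2 ≤ n / bs := by
          refine (Nat.le_div_iff_mul_le (by omega)).mpr (by omega)
        simp only [hdvd, beq_self_eq_true, if_true, if_pos hc] at hx
        exact ⟨by omega, bs, by omega, by omega, hbsdvd,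
          (block_iff tokens bs (by omega) hbsdvd hc).mp hx⟩
      · exfalso
        have : (n % bs == 0) = false := by simp [hdvd]
        rw [this] at hx
        simp at hx
    · rintro ⟨-, b, hb1, hb2, hbdvd, hper⟩
      refine ⟨b, by rw [List.mem_range'_1]; omega, ?_⟩
      have hmod : n % b = 0 := Nat.mod_eq_zero_of_dvd hbdvd
      have hc : 2 ≤ n / b := (Nat.le_div_iff_mul_le (by omega)).mpr (by omega)
      have hbeq : (n % b == 0) = true := by simp [hmod]
      rw [hbeq, if_pos rfl, if_pos hc]
      exact (block_iff tokens b hb1 hbdvd hc).mpr hper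

-- trial-division lemmas
theorem divOut_dvd (m q : Nat) : divOut m q ∣ m := by
  fun_induction divOut m q with
  | case1 m hcond ih => exact dvd_trans ih (Nat.div_dvd_of_dvd (Nat.dvd_of_mod_eq_zero hcond.2.2))
  | case2 m hcond => exact dvd_rfl

theorem divOut_pos (m q : Nat) (hm : 1 ≤ m) : 1 ≤ divOut m q := by
  fun_induction divOut m q with
  | case1 m hcond ih =>
    apply ih
    obtain ⟨k, rfl⟩ := Nat.dvd_of_mod_eq_zero hcond.2.2
    have hq2 : 2 ≤ q := hcond.1
    have hm1 : 1 ≤ q * k := hcond.2.1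
    have hdk : q * k / q = k := Nat.mul_div_cancel_left k (by omega)
    have hk1 : 1 ≤ k := by
      rcases k with _ | k
      · simp at hm1
      · omega
    omega
  | case2 m hcond => exact hm

theorem divOut_not_dvd (m q : Nat) : 2 ≤ q → 1 ≤ m → ¬ q ∣ divOut m q := by
  fun_induction divOut m q with
  | case1 m hcond ih =>
    intro hq _
    apply ih hq
    obtain ⟨k, rfl⟩ := Nat.dvd_of_mod_eq_zero hcond.2.2
    have hm1 : 1 ≤ q * k := hcond.2.1
    have hdk : q * k / q = k := Nat.mul_div_cancel_left k (by omega)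
    have hk1 : 1 ≤ k := by
      rcases k with _ | k
      · simp at hm1
      · omega
    omega
  | case2 m hcond =>
    intro hq hm hdvd
    exact hcond ⟨hq, hm, Nat.mod_eq_zero_of_dvd hdvd⟩

theorem prime_divOut (m q p : Nat) (hp : p.Prime) (hq : q.Prime) (hne : p ≠ q) :
    p ∣ m → p ∣ divOut m q := by
  fun_induction divOut m q with
  | case1 m hcond ih =>
    intro hdvd
    apply ih
    have hqq : 2 ≤ q := hcond.1
    have hme : m / q * q = m := Nat.div_mul_cancel (Nat.dvd_of_mod_eq_zero hcond.2.2)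
    have hsplit : p ∣ m / q * q := by rw [hme]; exact hdvd
    rcases (Nat.Prime.dvd_mul hp).mp hsplit with h | h
    · exact h
    · exact absurd ((Nat.prime_dvd_prime_iff_eq hp hq).mp h) hne
  | case2 m hcond => exact id

theorem trialDiv_mem (m q x : Nat) : 2 ≤ q → x ∈ trialDiv m q → x ∣ m ∧ 2 ≤ x := by
  fun_induction trialDiv m q with
  | case1 m q hle hmod ih =>
    intro hq hmem
    rcases List.mem_cons.mp hmem with rfl | hmem'
    · exact ⟨Nat.dvd_of_mod_eq_zero hmod, hq⟩
    · obtain ⟨hd, hx⟩ := ih (by omega) hmem'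
      exact ⟨dvd_trans hd (divOut_dvd m q), hx⟩
  | case2 m q hle hmod ih =>
    intro hq hmem
    exact ih (by omega) hmem
  | case3 m q hle hm =>
    intro hq hmem
    rcases List.mem_singleton.mp hmem with rfl
    exact ⟨dvd_rfl, by omega⟩
  | case4 m q hle hm =>
    intro _ hmem
    simp at hmem

theorem trialDiv_complete (m q p : Nat) (hp : p.Prime) :
    p ∣ m → 1 ≤ m → 2 ≤ q → (∀ r, 2 ≤ r → r < q → ¬ r ∣ m) → p ∈ trialDiv m q := by
  fun_induction trialDiv m q with
  | case1 m q hle hmod ih =>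
    intro hdvd hm hq inv
    have hqm : q ∣ m := Nat.dvd_of_mod_eq_zero hmod
    have hqprime : q.Prime := by
      by_contra hnp
      obtain ⟨r, hr_dvd, hr2, hrlt⟩ := Nat.exists_dvd_of_not_prime2 hq hnp
      exact inv r hr2 hrlt (dvd_trans hr_dvd hqm)
    by_cases hpq : p = q
    · subst hpq; exact List.mem_cons_self
    · apply List.mem_cons_of_mem
      apply ih (prime_divOut m q p hp hqprime hpq hdvd) (divOut_pos m q hm) (by omega)
      intro r h2 hlt hdvd'
      by_cases hrq : r = q
      · subst hrq; exact divOut_not_dvd m r hq hm hdvd'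
      · exact inv r h2 (by omega) (dvd_trans hdvd' (divOut_dvd m q))
  | case2 m q hle hmod ih =>
    intro hdvd hm hq inv
    apply ih hdvd hm (by omega)
    intro r h2 hlt
    by_cases hrq : r = q
    · subst hrq; intro hd; exact hmod (Nat.mod_eq_zero_of_dvd hd)
    · exact inv r h2 (by omega)
  | case3 m q hle h1m =>
    intro hdvd hm hq inv
    have hp2 := hp.two_le
    obtain ⟨s, hs⟩ := hdvd
    have hs1 : s = 1 := by
      by_contra hsne
      have hs0 : s ≠ 0 := by rintro rfl; omega
      have hs2 : 2 ≤ s := by omega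
      by_cases hcase : p ≤ s
      · have hpp : p * p ≤ m := by rw [hs]; exact Nat.mul_le_mul_left p hcase
        have hpq : p < q := by nlinarith
        exact inv p hp2 hpq ⟨s, hs⟩
      · have hss : s * s ≤ m := by rw [hs]; nlinarith
        have hsq : s < q := by nlinarith
        exact inv s hs2 hsq ⟨p, by rw [hs]; ring⟩
    rw [List.mem_singleton, hs, hs1, Nat.mul_one]
  | case4 m q hle hm1 =>
    intro hdvd hm hq inv
    have : m = 1 := by omega
    subst this
    exact absurd (Nat.eq_one_of_dvd_one hdvd) hp.one_lt.ne'

-- characterisation of port B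
theorem B_iff (tokens : List String) :
    has_repetition_alt tokens = true ↔
      4 ≤ tokens.length ∧ ∃ q ∈ trialDiv tokens.length 2, Per tokens (tokens.length / q) := by
  set n := tokens.length with hn
  unfold has_repetition_alt
  by_cases h4 : n < 4
  · simp only [← hn]
    rw [if_pos h4]
    simp
    omega
  · simp only [← hn]
    rw [if_neg h4]
    rw [List.any_eq_true]
    constructor
    · rintro ⟨q, hq, hall⟩
      exact ⟨by omega, q, hq, (perB_iff tokens (n / q)).mp hall⟩
    · rintro ⟨-, q, hq, hper⟩
      exact ⟨q, hq, (perB_iff tokens (n / q)).mpr hper⟩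

theorem AB_eq (tokens : List String) : has_repetition tokens = has_repetition_alt tokens := by
  set n := tokens.length with hn
  rw [Bool.eq_iff_iff, A_iff, B_iff]
  constructor
  · rintro ⟨h4, b, hb1, hb2, hbdvd, hper⟩
    refine ⟨h4, ?_⟩
    have hc2 : 2 ≤ n / b := (Nat.le_div_iff_mul_le (by omega)).mpr (by omega)
    set c := n / b with hc
    have hpp : (c.minFac).Prime := Nat.minFac_prime (by omega)
    have hpc : c.minFac ∣ c := Nat.minFac_dvd c
    have hpn : c.minFac ∣ n := dvd_trans hpc (Nat.div_dvd_of_dvd hbdvd)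
    have hmem : c.minFac ∈ trialDiv n 2 :=
      trialDiv_complete n 2 c.minFac hpp hpn (by omega) (by omega)
        (fun r h2 hlt _ => by omega)
    have hnbc : n = b * c := (Nat.mul_div_cancel' hbdvd).symm
    have hbd : b ∣ n / c.minFac := by
      refine ⟨c / c.minFac, ?_⟩
      rw [hnbc, Nat.mul_div_assoc b hpc]
    exact ⟨c.minFac, hmem, per_dvd tokens b (n / c.minFac) hper hbd⟩
  · rintro ⟨h4, q, hq, hper⟩
    obtain ⟨hqd, hq2⟩ := trialDiv_mem n 2 q le_rfl hq
    have hq_le : q ≤ n := Nat.le_of_dvd (by omega) hqd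
    have hqb : q * (n / q) = n := Nat.mul_div_cancel' hqd
    have hb1 : 1 ≤ n / q := Nat.div_pos hq_le (by omega)
    have hb2 : n / q ≤ n / 2 := (Nat.le_div_iff_mul_le (by omega)).mpr (by nlinarith)
    exact ⟨h4, n / q, hb1, hb2, Nat.div_dvd_of_dvd hqd, hper⟩

-- ===== VERDICT (by name: the statement is the Claim_ definition above) =====
theorem has_repetition_spec : Claim_equal_has_repetition := by
  intro tokens _
  unfold Spec_has_repetition
  exact AB_eq tokens
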